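-- pv_equiv track=rewrite | github.com/thiagorocha14/algoritmos_faculdade | python/viajante/thread/caixeiro_thread.py | melhor_combinacao
-- ===== SOURCE A (Python) =====
-- def melhor_combinacao(melhores_combinacoes):
--     melhor_combinacao = melhores_combinacoes[0][0]
--     melhor_custo = melhores_combinacoes[0][1]
--     combinacoes = []
--     for combinacao in melhores_combinacoes:
--         if combinacao[1] < melhor_custo:
--             melhor_custo = combinacao[1]
--             melhor_combinacao = combinacao[0]
--             combinacoes = [combinacao]
--         elif combinacao[1] == melhor_custo:
--             combinacoes.append(combinacao)
--     return combinacoes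
-- ===== SOURCE B (Python) =====
-- def melhor_combinacao(melhores_combinacoes):
--     melhor_custo = melhores_combinacoes[0][1]
--     for combinacao in melhores_combinacoes:
--         if combinacao[1] < melhor_custo:
--             melhor_custo = combinacao[1]
--     return [c for c in melhores_combinacoes if c[1] == melhor_custo]
-- ===== Notes on version B (the rewrite author's own statement) =====
-- stated objective: simpler
-- what changed: A's fused single pass (which tracks the running minimum and resets/extends a result list in place) is split into a min-finding pass followed by a plain filter comprehension.
import Mathlib
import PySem

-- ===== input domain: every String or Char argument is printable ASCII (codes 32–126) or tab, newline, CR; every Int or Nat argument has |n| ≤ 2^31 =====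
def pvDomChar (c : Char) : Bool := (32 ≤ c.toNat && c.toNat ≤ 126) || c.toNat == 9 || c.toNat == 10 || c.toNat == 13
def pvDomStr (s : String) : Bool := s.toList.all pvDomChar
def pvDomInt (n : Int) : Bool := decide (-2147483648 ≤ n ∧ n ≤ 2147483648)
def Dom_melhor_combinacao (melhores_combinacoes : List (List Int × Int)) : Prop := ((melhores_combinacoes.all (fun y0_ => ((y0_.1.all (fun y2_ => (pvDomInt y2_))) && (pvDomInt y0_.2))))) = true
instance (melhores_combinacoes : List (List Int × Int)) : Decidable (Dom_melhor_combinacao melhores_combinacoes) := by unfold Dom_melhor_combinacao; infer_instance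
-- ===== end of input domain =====

-- B replaces A's fused single pass (running minimum + in-place reset/extend of the result list)
-- by a min-finding pass followed by a plain filter; objective: simpler.

-- ===== PORT A =====
-- A's loop state: (melhor_custo, combinacoes); the variable melhor_combinacao is never
-- returned, so it is not carried. Empty input raises IndexError in Python (excluded by Pre_).
def melhor_combinacao (melhores_combinacoes : List (List Int × Int)) : List (List Int × Int) :=
  match melhores_combinacoes with
  | [] => []   -- unreachable under Pre_ (Python raises IndexError here)
  | c0 :: _ =>
    (melhores_combinacoes.foldl
      (fun (st : Int × List (List Int × Int)) combinacao =>
        if combinacao.2 < st.1 then (combinacao.2, [combinacao])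
        else if combinacao.2 == st.1 then (st.1, st.2 ++ [combinacao])
        else st)
      (c0.2, [])).2

-- ===== PORT B =====
def melhor_combinacao_alt (melhores_combinacoes : List (List Int × Int)) : List (List Int × Int) :=
  match melhores_combinacoes with
  | [] => []   -- unreachable under Pre_ (Python raises IndexError here)
  | c0 :: _ =>
    let melhor_custo := melhores_combinacoes.foldl
      (fun m combinacao => if combinacao.2 < m then combinacao.2 else m) c0.2
    melhores_combinacoes.filter (fun c => c.2 == melhor_custo)

-- ===== PRECONDITION & SPEC =====
-- Python A raises IndexError on the empty list (melhores_combinacoes[0][0]); B raises there too.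
def Pre_melhor_combinacao (melhores_combinacoes : List (List Int × Int)) : Prop :=
  melhores_combinacoes ≠ []
instance (melhores_combinacoes : List (List Int × Int)) : Decidable (Pre_melhor_combinacao melhores_combinacoes) := by
  unfold Pre_melhor_combinacao; infer_instance
def pvWitness_melhor_combinacao : (List (List Int × Int)) := [([1, 2], 5), ([2, 1], 3), ([3], 3)]
def Spec_melhor_combinacao (melhores_combinacoes : List (List Int × Int)) (out : List (List Int × Int)) : Prop := out = melhor_combinacao_alt melhores_combinacoes
instance (melhores_combinacoes : List (List Int × Int)) (out : List (List Int × Int)) : Decidable (Spec_melhor_combinacao melhores_combinacoes out) := by unfold Spec_melhor_combinacao; infer_instance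

-- ===== CLAIM (what is proved, stated in full; the proofs are below) =====
def Claim_equal_melhor_combinacao : Prop := ∀ (melhores_combinacoes : List (List Int × Int)), Dom_melhor_combinacao melhores_combinacoes → Pre_melhor_combinacao melhores_combinacoes → Spec_melhor_combinacao melhores_combinacoes (melhor_combinacao melhores_combinacoes)

-- ===== LEMMAS AND PROOFS =====

-- abbreviations for the two fold bodies (proof-side only)
def stepA (st : Int × List (List Int × Int)) (c : List Int × Int) : Int × List (List Int × Int) :=
  if c.2 < st.1 then (c.2, [c])
  else if c.2 == st.1 then (st.1, st.2 ++ [c])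
  else st

def minf (l : List (List Int × Int)) (m : Int) : Int :=
  l.foldl (fun m c => if c.2 < m then c.2 else m) m

theorem minf_le_init (l : List (List Int × Int)) (m : Int) : minf l m ≤ m := by
  induction l generalizing m with
  | nil => simp [minf]
  | cons c t ih =>
    simp only [minf, List.foldl_cons]
    by_cases h : c.2 < m
    · simp only [h, if_pos]
      exact le_trans (ih c.2) (le_of_lt h)
    · simp only [h, if_neg, not_false_iff]
      exact ih m

-- Invariant of A's fused loop: its result is the running min together with either the
-- accumulator extended by the equal-cost elements (if the min never drops), or the
-- filter at the new minimum (if it does).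
theorem loopA_char (l : List (List Int × Int)) (m : Int) (acc : List (List Int × Int)) :
    l.foldl stepA (m, acc) =
      (minf l m,
        if minf l m = m then acc ++ l.filter (fun c => c.2 == m)
        else l.filter (fun c => c.2 == minf l m)) := by
  induction l generalizing m acc with
  | nil => simp [minf]
  | cons c t ih =>
    have hmin : minf (c :: t) m = minf t (if c.2 < m then c.2 else m) := by
      simp [minf]
    rcases lt_trichotomy c.2 m with h | h | h
    · -- strict drop: reset to [c]
      have hm : minf (c :: t) m = minf t c.2 := by simp [hmin, h]
      have hne : ¬ minf (c :: t) m = m := by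
        have := minf_le_init t c.2
        rw [hm]; omega
      simp only [List.foldl_cons, stepA, h, if_pos, ih, hm]
      have hle := minf_le_init t c.2
      by_cases he : minf t c.2 = c.2
      · have hcm : ¬ c.2 = m := ne_of_lt h
        simp [he, hcm]
      · have hne2 : ¬ (c.2 == minf t c.2) = true := by
          simp only [beq_iff_eq]; omega
        have hnm : ¬ minf t c.2 = m := by rw [← hm]; exact hne
        simp [he, hne2, hnm]
    · -- equal: append c
      have hm : minf (c :: t) m = minf t m := by simp [hmin, h]
      simp only [List.foldl_cons, stepA, h, lt_irrefl, beq_self_eq_true, if_pos, ih, hm]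
      by_cases he : minf t m = m
      · simp [he, h]
      · have hne2 : ¬ (c.2 == minf t m) = true := by
          have := minf_le_init t m
          simp only [beq_iff_eq]; omega
        simp [he, hne2]
    · -- larger: skip
      have hn1 : ¬ c.2 < m := by omega
      have hn2 : ¬ (c.2 == m) = true := by simp only [beq_iff_eq]; omega
      have hm : minf (c :: t) m = minf t m := by simp [hmin, hn1]
      simp only [List.foldl_cons, stepA, hn1, if_neg, not_false_iff, hn2, if_neg, ih, hm]
      by_cases he : minf t m = m
      · simp [he, hn2]
      · have hne2 : ¬ (c.2 == minf t m) = true := by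
          have := minf_le_init t m
          simp only [beq_iff_eq]; omega
        simp [he, hne2]

-- ===== VERDICT (by name: the statement is the Claim_ definition above) =====
theorem melhor_combinacao_spec : Claim_equal_melhor_combinacao := by
  intro l _ hpre
  unfold Spec_melhor_combinacao
  match l, hpre with
  | c0 :: t, _ =>
    show (( (c0 :: t).foldl stepA (c0.2, []))).2 = _
    rw [loopA_char]
    have halt : melhor_combinacao_alt (c0 :: t) =
        (c0 :: t).filter (fun c => c.2 == minf (c0 :: t) c0.2) := rfl
    rw [halt]
    by_cases he : minf (c0 :: t) c0.2 = c0.2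
    · rw [if_pos he, he, List.nil_append]
    · rw [if_neg he]
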